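-- pv_equiv track=rewrite | github.com/ry755/ryfs | ryfs.py | find_first_clear
-- ===== SOURCE A (Python) =====
-- def find_first_clear(byte):
--     if byte == 0b11111111:
--         return None
--     first_clear = 0
--     while (byte % 2) == 1:
--         first_clear += 1
--         byte = byte >> 1
--     return first_clear
-- ===== SOURCE B (Python) =====
-- def find_first_clear(byte):
--     if byte == 0b11111111:
--         return None
--     m = byte + 1
--     return (m & -m).bit_length() - 1
-- ===== Notes on version B (the rewrite author's own statement) =====
-- stated objective: simpler
-- what changed: Replaced the bit-by-bit shift-and-test while-loop with the closed-form low-bit trick: the count of trailing one-bits of byte equals ((byte+1) & -(byte+1)).bit_length() - 1.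
-- outside the precondition, e.g. on find_first_clear(-1): A does not finish within the time limit, B returns -1
import Mathlib
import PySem

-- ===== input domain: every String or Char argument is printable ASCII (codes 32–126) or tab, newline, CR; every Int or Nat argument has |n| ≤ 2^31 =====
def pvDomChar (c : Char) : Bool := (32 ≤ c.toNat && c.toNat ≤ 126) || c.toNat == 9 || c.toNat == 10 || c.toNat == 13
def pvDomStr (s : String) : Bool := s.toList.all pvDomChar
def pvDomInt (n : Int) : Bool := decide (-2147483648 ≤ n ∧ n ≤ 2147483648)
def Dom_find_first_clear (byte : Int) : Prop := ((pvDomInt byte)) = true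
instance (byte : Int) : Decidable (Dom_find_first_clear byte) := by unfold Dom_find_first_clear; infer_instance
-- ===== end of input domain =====

-- B replaces A's bit-by-bit while-loop with Python's closed-form low-bit trick
-- ((byte+1) & -(byte+1)).bit_length() - 1 (objective: simpler).


-- ===== PORT A =====
-- the while-loop; fuel only makes it total (at byte = -1 Python loops forever, excluded by Pre_;
-- on every other input natAbs byte + 1 steps suffice)
def ffcLoop : Nat → Int → Int → Int
  | 0, _, first_clear => first_clear
  | fuel + 1, byte, first_clear =>
    if PySem.Int.mod byte 2 = 1 then ffcLoop fuel (byte >>> (1 : Nat)) (first_clear + 1)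
    else first_clear

def find_first_clear (byte : Int) : Option Int :=
  if byte = 255 then none
  else some (ffcLoop (byte.natAbs + 1) byte 0)

-- ===== PORT B =====
def find_first_clear_alt (byte : Int) : Option Int :=
  if byte = 255 then none
  else
    let m := byte + 1
    some ((PySem.Int.bitLength (PySem.Int.band m (-m)) : Int) - 1)

-- ===== PRECONDITION & SPEC =====
-- Pre_ excludes only byte = -1, on which A's while-loop never terminates (byte % 2 stays 1 and
-- byte >> 1 leaves -1 unchanged); A raises/returns on no other input differently.
def Pre_find_first_clear (byte : Int) : Prop := byte ≠ -1
instance (byte : Int) : Decidable (Pre_find_first_clear byte) := by unfold Pre_find_first_clear; infer_instance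
def pvWitness_find_first_clear : Int := 6

def Spec_find_first_clear (byte : Int) (out : Option Int) : Prop := out = find_first_clear_alt byte
instance (byte : Int) (out : Option Int) : Decidable (Spec_find_first_clear byte out) := by unfold Spec_find_first_clear; infer_instance

-- ===== CLAIM (what is proved, stated in full; the proofs are below) =====
def Claim_equal_find_first_clear : Prop := ∀ (byte : Int), Dom_find_first_clear byte → Pre_find_first_clear byte → Spec_find_first_clear byte (find_first_clear byte)

-- ===== LEMMAS AND PROOFS =====

-- (2a+1) &&& (2a) = 2a : an odd number shares all bits of its predecessor except bit 0
lemma land_odd_pred (a : Nat) : (2 * a + 1) &&& (2 * a) = 2 * a := by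
  apply Nat.eq_of_testBit_eq
  intro i
  cases i with
  | zero => simp [Nat.testBit_zero, Nat.mul_mod_right]
  | succ i =>
      rw [Nat.testBit_land]
      simp only [Nat.testBit_succ]
      have h1 : (2 * a + 1) / 2 = a := by omega
      have h2 : (2 * a) / 2 = a := by omega
      rw [h1, h2, Bool.and_self]

-- (2(b+1)) &&& (2b+1) = 2 * ((b+1) &&& b) : the even/odd pair halves cleanly
lemma land_even_pred (b : Nat) : (2 * (b + 1)) &&& (2 * b + 1) = 2 * ((b + 1) &&& b) := by
  apply Nat.eq_of_testBit_eq
  intro i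
  cases i with
  | zero => simp [Nat.testBit_zero, Nat.mul_mod_right]
  | succ i =>
      rw [Nat.testBit_land]
      simp only [Nat.testBit_succ]
      have h1 : (2 * (b + 1)) / 2 = b + 1 := by omega
      have h2 : (2 * b + 1) / 2 = b := by omega
      have h3 : (2 * ((b + 1) &&& b)) / 2 = (b + 1) &&& b := by omega
      rw [h1, h2, h3, Nat.testBit_land]

-- lowBit n := n - (n &&& (n-1)) at the Nat level
lemma lowbit_odd (n : Nat) (h : n % 2 = 1) : n - (n &&& (n - 1)) = 1 := by
  obtain ⟨a, rfl⟩ : ∃ a, n = 2 * a + 1 := ⟨n / 2, by omega⟩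
  have : (2 * a + 1) - 1 = 2 * a := by omega
  rw [this, land_odd_pred]
  omega

lemma lowbit_even (n : Nat) (h0 : n ≠ 0) (h : n % 2 = 0) :
    n - (n &&& (n - 1)) = 2 * (n / 2 - ((n / 2) &&& (n / 2 - 1))) := by
  obtain ⟨b, rfl⟩ : ∃ b, n = 2 * (b + 1) := ⟨n / 2 - 1, by omega⟩
  have h1 : (2 * (b + 1)) - 1 = 2 * b + 1 := by omega
  have h2 : (2 * (b + 1)) / 2 = b + 1 := by omega
  have h3 : (b + 1) - 1 = b := by omega
  rw [h1, land_even_pred, h2, h3]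
  have hle : (b + 1) &&& b ≤ b + 1 := Nat.and_le_left
  omega

lemma lowbit_pos (n : Nat) (h0 : n ≠ 0) : 0 < n - (n &&& (n - 1)) := by
  induction n using Nat.strong_induction_on with
  | _ n ih =>
    rcases Nat.even_or_odd n with he | ho
    · have h : n % 2 = 0 := Nat.even_iff.mp he
      rw [lowbit_even n h0 h]
      have := ih (n / 2) (by omega) (by omega)
      omega
    · rw [lowbit_odd n (Nat.odd_iff.mp ho)]; omega

-- band m (-m) is the low bit, expressed through natAbs
lemma band_neg_self (m : Int) :
    PySem.Int.band m (-m) = ((m.natAbs - (m.natAbs &&& (m.natAbs - 1)) : Nat) : Int) := by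
  unfold PySem.Int.band
  by_cases h0 : m = 0
  · subst h0; norm_num
  · by_cases h : 0 ≤ m
    · have h2 : ¬ (0 : Int) ≤ -m := by omega
      rw [if_pos h, if_neg h2]
      have e1 : m.toNat = m.natAbs := by omega
      have e2 : (-(-m) - 1).toNat = m.natAbs - 1 := by omega
      rw [e1, e2]
    · have h2 : (0 : Int) ≤ -m := by omega
      rw [if_neg h, if_pos h2]
      have e1 : (-m).toNat = m.natAbs := by omega
      have e2 : (-m - 1).toNat = m.natAbs - 1 := by omega
      rw [e1, e2]

-- the closed-form value of B's expression, as a function of byte, satisfies the loop's recurrence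
lemma loop_eq (fuel : Nat) : ∀ (byte acc : Int), byte ≠ -1 → byte.natAbs < fuel →
    ffcLoop fuel byte acc =
      acc + ((PySem.Int.bitLength (PySem.Int.band (byte + 1) (-(byte + 1))) : Int) - 1) := by
  induction fuel with
  | zero => intro byte acc _ h; omega
  | succ fuel ih =>
    intro byte acc hne hlt
    have hmod : PySem.Int.mod byte 2 = byte % 2 := PySem.Int.mod_eq_emod_of_pos (by omega)
    set m : Int := byte + 1 with hm
    have hmabs : m.natAbs ≠ 0 := by omega
    by_cases hodd : PySem.Int.mod byte 2 = 1
    · -- byte odd ⇒ m even: loop recurses, B's value halves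
      have hb2 : byte % 2 = 1 := by rw [← hmod]; exact hodd
      have hshift : byte >>> (1 : Nat) = byte / 2 := by
        rw [Int.shiftRight_eq_div_pow]; norm_num
      have hne' : byte / 2 ≠ -1 := by omega
      have hlt' : (byte / 2).natAbs < fuel := by omega
      rw [ffcLoop, if_pos hodd, hshift, ih (byte / 2) (acc + 1) hne' hlt']
      -- relate B's expressions at byte and byte / 2
      have hmeven : m.natAbs % 2 = 0 := by omega
      have hm2 : (byte / 2 + 1).natAbs = m.natAbs / 2 := by omega
      rw [band_neg_self, band_neg_self, hm2]
      rw [lowbit_even m.natAbs hmabs hmeven]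
      have key : ∀ X : Nat, 0 < X →
          (acc + 1) + ((PySem.Int.bitLength ((X : Nat) : Int) : Int) - 1)
            = acc + ((PySem.Int.bitLength ((2 * X : Nat) : Int) : Int) - 1) := by
        intro X hX
        rw [PySem.Int.bitLength_natCast (m := 2 * X) (by omega)]
        have h2X : 2 * X / 2 = X := by omega
        rw [h2X]
        push_cast
        ring
      exact key _ (lowbit_pos (m.natAbs / 2) (by omega))
    · -- byte even ⇒ m odd: loop stops, B's expression is bit_length 1 - 1 = 0
      have hb2 : byte % 2 = 0 := by omega
      have hmodd : m.natAbs % 2 = 1 := by omega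
      rw [ffcLoop, if_neg hodd, band_neg_self, lowbit_odd m.natAbs hmodd]
      norm_num
      rfl

-- ===== VERDICT (by name: the statement is the Claim_ definition above) =====
theorem find_first_clear_spec : Claim_equal_find_first_clear := by
  intro byte _ hpre
  unfold Spec_find_first_clear find_first_clear find_first_clear_alt
  by_cases h255 : byte = 255
  · simp [h255]
  · rw [if_neg h255, if_neg h255, loop_eq (byte.natAbs + 1) byte 0 hpre (by omega)]
    norm_num
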